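-- pv_equiv track=rewrite | github.com/EudaldSans/advent_of_code | 2023/day_09/puzzles.py | find_value_history
-- ===== SOURCE A (Python) =====
-- from typing import List, Tuple
--
-- def find_value_history(value_sequence: List[int]) -> List[Tuple[int, int]]:
--     history_found = False
--
--     output_sequence = [(value_sequence[0], value_sequence[-1])]
--
--     while not history_found:
--         history_found = True
--         new_sequence = list()
--         for i in range(len(value_sequence) - 1):
--             new_value = value_sequence[i + 1] - value_sequence[i]
--             new_sequence.append(new_value)
--             if new_value != 0: history_found = False
--
--         output_sequence.append((new_sequence[0], new_sequence[-1]))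
--         value_sequence = new_sequence
--
--     return output_sequence
-- ===== SOURCE B (Python) =====
-- from typing import List, Tuple
--
-- def find_value_history(value_sequence: List[int]) -> List[Tuple[int, int]]:
--     head = (value_sequence[0], value_sequence[-1])
--     diffs = [b - a for a, b in zip(value_sequence, value_sequence[1:])]
--     tail = (diffs[0], diffs[-1])
--     if all(d == 0 for d in diffs):
--         return [head, tail]
--     return [head] + find_value_history(diffs)
-- ===== Notes on version B (the rewrite author's own statement) =====
-- stated objective: simpler
-- what changed: Replaces the flag-driven while loop with list mutation by direct structural recursion on the successive difference levels, computing each level with zip instead of index arithmetic.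
import Mathlib
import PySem

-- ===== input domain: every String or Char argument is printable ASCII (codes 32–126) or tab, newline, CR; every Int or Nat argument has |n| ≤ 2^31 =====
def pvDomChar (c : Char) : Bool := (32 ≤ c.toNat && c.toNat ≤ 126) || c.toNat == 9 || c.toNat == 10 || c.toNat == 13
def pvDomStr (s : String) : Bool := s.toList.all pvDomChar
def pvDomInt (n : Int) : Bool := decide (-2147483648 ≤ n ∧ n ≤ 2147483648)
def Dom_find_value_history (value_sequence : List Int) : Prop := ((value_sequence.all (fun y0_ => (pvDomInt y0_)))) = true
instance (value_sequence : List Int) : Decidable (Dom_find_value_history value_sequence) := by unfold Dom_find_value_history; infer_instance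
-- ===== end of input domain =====

-- B replaces A's flag-driven while loop (mutating accumulator) by direct structural
-- recursion on the difference levels (objective: simpler). Return values only; neither mutates.

-- (value_sequence[0], value_sequence[-1]) — both Pythons contain this exact pair of indexings
def pvHeadTail (xs : List Int) : Int × Int :=
  ((PySem.List.pyGet? xs 0).getD 0, (PySem.List.pyGet? xs (-1)).getD 0)

-- ===== PORT A =====
-- the while loop of A; `out` is output_sequence.  Python raises IndexError at
-- new_sequence[0] when new_sequence is empty: outside Pre_, we return `out` there.
def findA_go (vs : List Int) (out : List (Int × Int)) : List (Int × Int) :=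
  let ns := (List.range (vs.length - 1)).map (fun (i : Nat) =>
      (PySem.List.pyGet? vs ((i : Int) + 1)).getD 0 - (PySem.List.pyGet? vs (i : Int)).getD 0)
  let history_found := ns.all (· == 0)
  if h : ns = [] then out
  else if history_found then out ++ [pvHeadTail ns]
  else findA_go ns (out ++ [pvHeadTail ns])
termination_by vs.length
decreasing_by
  have h0 : 0 < ((List.range (vs.length - 1)).map (fun (i : Nat) =>
      (PySem.List.pyGet? vs ((i : Int) + 1)).getD 0 - (PySem.List.pyGet? vs (i : Int)).getD 0)).length :=
    List.length_pos_iff.mpr h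
  simp at h0 ⊢
  omega

def find_value_history (value_sequence : List Int) : List (Int × Int) :=
  -- Python raises IndexError on [] at value_sequence[0]; outside Pre_
  if value_sequence = [] then []
  else findA_go value_sequence [pvHeadTail value_sequence]

-- ===== PORT B =====
def find_value_history_alt (value_sequence : List Int) : List (Int × Int) :=
  if hv : value_sequence = [] then []  -- Python raises IndexError here; outside Pre_
  else
    let head := pvHeadTail value_sequence
    let diffs := List.zipWith (fun a b => b - a) value_sequence value_sequence.tail
    if _hd : diffs = [] then [head]     -- Python raises IndexError at diffs[0]; outside Pre_
    else
      let tl := pvHeadTail diffs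
      if diffs.all (· == 0) then [head, tl]
      else head :: find_value_history_alt diffs
termination_by value_sequence.length
decreasing_by
  have h0 : 0 < value_sequence.length := List.length_pos_iff.mpr hv
  simp only [List.length_zipWith, List.length_tail]
  omega

-- ===== PRECONDITION & SPEC =====
-- one difference level (zipWith of consecutive differences, iterated)
def pvDiffs (xs : List Int) : List Int := List.zipWith (fun a b => b - a) xs xs.tail

-- Pre_ excludes exactly the inputs where A raises IndexError: the empty list, and
-- sequences no nonempty difference level of which is all zero (A then reaches an empty level).
def Pre_find_value_history (value_sequence : List Int) : Prop :=
  2 ≤ value_sequence.length ∧ (pvDiffs^[value_sequence.length - 1] value_sequence).all (· == 0) = true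
instance (value_sequence : List Int) : Decidable (Pre_find_value_history value_sequence) := by
  unfold Pre_find_value_history; infer_instance

def pvWitness_find_value_history : List Int := [1, 3, 5, 7]

def Spec_find_value_history (value_sequence : List Int) (out : List (Int × Int)) : Prop := out = find_value_history_alt value_sequence
instance (value_sequence : List Int) (out : List (Int × Int)) : Decidable (Spec_find_value_history value_sequence out) := by unfold Spec_find_value_history; infer_instance

-- ===== CLAIM (what is proved, stated in full; the proofs are below) =====
def Claim_equal_find_value_history : Prop := ∀ (value_sequence : List Int), Dom_find_value_history value_sequence → Pre_find_value_history value_sequence → Spec_find_value_history value_sequence (find_value_history value_sequence)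

-- ===== LEMMAS AND PROOFS =====

-- A's index-comprehension for the difference level equals B's zip form
lemma rangeMap_eq_pvDiffs (vs : List Int) :
    (List.range (vs.length - 1)).map (fun (i : Nat) =>
      (PySem.List.pyGet? vs ((i : Int) + 1)).getD 0 - (PySem.List.pyGet? vs (i : Int)).getD 0)
      = pvDiffs vs := by
  apply List.ext_getElem
  · simp [pvDiffs]
  · intro j h1 h2
    have hj1 : j + 1 < vs.length := by simp at h1; omega
    have hc : ((j : Int) + 1) = ((j + 1 : Nat) : Int) := by push_cast; ring
    simp only [List.getElem_map, List.getElem_range]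
    rw [hc, PySem.List.pyGet?_natCast, PySem.List.pyGet?_natCast]
    simp [pvDiffs, hj1, Nat.lt_of_succ_lt hj1, List.getElem_zipWith, List.getElem_tail]

lemma pvDiffs_length (vs : List Int) (h : vs ≠ []) : (pvDiffs vs).length = vs.length - 1 := by
  have : 0 < vs.length := List.length_pos_iff.mpr h
  simp only [pvDiffs, List.length_zipWith, List.length_tail]; omega

-- Pre propagates to the next level when the current diffs are not all zero
lemma pre_step (vs : List Int) (hp : Pre_find_value_history vs)
    (hnz : ¬ ((pvDiffs vs).all (· == 0) = true)) :
    Pre_find_value_history (pvDiffs vs) := by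
  obtain ⟨h2, hz⟩ := hp
  have hvne : vs ≠ [] := by intro h; subst h; simp at h2
  have hn3 : 3 ≤ vs.length := by
    by_contra h
    have : vs.length = 2 := by omega
    rw [this] at hz
    rw [Function.iterate_one] at hz
    exact hnz hz
  have hl := pvDiffs_length vs hvne
  refine ⟨by omega, ?_⟩
  rw [hl]
  have : pvDiffs^[vs.length - 1] vs = pvDiffs^[vs.length - 1 - 1] (pvDiffs vs) := by
    conv_lhs => rw [show vs.length - 1 = (vs.length - 1 - 1) + 1 by omega]
    exact Function.iterate_succ_apply pvDiffs (vs.length - 1 - 1) vs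
  rw [← this]; exact hz

lemma pre_ne_nil (vs : List Int) (hp : Pre_find_value_history vs) : vs ≠ [] := by
  obtain ⟨h2, -⟩ := hp
  intro h; subst h; simp at h2

lemma pre_diffs_ne_nil (vs : List Int) (hp : Pre_find_value_history vs) : pvDiffs vs ≠ [] := by
  obtain ⟨h2, -⟩ := hp
  have hvne : vs ≠ [] := by intro h'; subst h'; simp at h2
  intro h
  have hl := pvDiffs_length vs hvne
  rw [h] at hl
  simp at hl
  omega

-- B's result always starts with the head pair
lemma alt_cons (vs : List Int) (h : vs ≠ []) :
    find_value_history_alt vs = pvHeadTail vs :: (find_value_history_alt vs).tail := by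
  rw [find_value_history_alt]
  simp only [dif_neg h]
  split_ifs <;> rfl

-- the main loop invariant
lemma go_eq (n : Nat) : ∀ (vs : List Int) (out : List (Int × Int)), vs.length = n →
    Pre_find_value_history vs →
    findA_go vs out = out ++ (find_value_history_alt vs).tail := by
  induction n using Nat.strong_induction_on with
  | _ n ih =>
    intro vs out hlen hp
    have hne := pre_ne_nil vs hp
    have hdne := pre_diffs_ne_nil vs hp
    rw [findA_go, find_value_history_alt]
    simp only [rangeMap_eq_pvDiffs vs,
      show List.zipWith (fun a b => b - a) vs vs.tail = pvDiffs vs from rfl,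
      dif_neg hdne, dif_neg hne]
    by_cases hz : (pvDiffs vs).all (· == 0) = true
    · simp only [if_pos hz, List.tail_cons]
    · simp only [if_neg hz, List.tail_cons]
      have hlt : (pvDiffs vs).length < n := by
        rw [pvDiffs_length vs hne]
        have : 0 < vs.length := List.length_pos_iff.mpr hne
        omega
      rw [ih (pvDiffs vs).length hlt (pvDiffs vs) _ rfl (pre_step vs hp hz)]
      conv_rhs => rw [alt_cons (pvDiffs vs) hdne]
      simp

-- ===== VERDICT (by name: the statement is the Claim_ definition above) =====
theorem find_value_history_spec : Claim_equal_find_value_history := by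
  intro vs _ hp
  unfold Spec_find_value_history
  have hne := pre_ne_nil vs hp
  rw [find_value_history, if_neg hne, go_eq vs.length vs _ rfl hp,
    List.singleton_append, ← alt_cons vs hne]
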